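-- pv_equiv track=rewrite | github.com/YamenSA/Projects | Arithmetic Formatter Project/Arithmetic Formatter Project.py | digit_length_checker
-- ===== SOURCE A (Python) =====
-- def digit_checker(problems):
--     for problem in problems:
--         operands = problem.split()
--         for op in operands:
--             if op.isdigit():
--                 continue
--             elif op == "+" or op == "-":
--                 continue
--             else:
--                 return False
--     return True
--
-- def digit_length_checker(problems):
--     if digit_checker(problems):
--         for problem in problems:
--             operands = problem.split()
--             for op in operands:
--                 if op == "+" or op == "-":
--                     continue
--                 elif len(op) < 5:
--                     continue
--                 else:
--                     return False
--     return True
-- ===== SOURCE B (Python) =====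
-- def digit_length_checker(problems):
--     # Single pass over all tokens: bail out True on the first non-digit,
--     # non-operator token (A's invalid => True behaviour), otherwise track
--     # whether any operand is 5+ chars long.
--     has_long = False
--     for problem in problems:
--         for op in problem.split():
--             if op == "+" or op == "-":
--                 continue
--             if not op.isdigit():
--                 return True
--             if len(op) >= 5:
--                 has_long = True
--     return not has_long
-- ===== Notes on version B (the rewrite author's own statement) =====
-- stated objective: alternative
-- what changed: Replaces A's two full traversals (digit_checker pre-scan, then a separate length loop) with one single pass that early-returns True on the first invalid token and otherwise accumulates a has_long flag.
import Mathlib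
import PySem

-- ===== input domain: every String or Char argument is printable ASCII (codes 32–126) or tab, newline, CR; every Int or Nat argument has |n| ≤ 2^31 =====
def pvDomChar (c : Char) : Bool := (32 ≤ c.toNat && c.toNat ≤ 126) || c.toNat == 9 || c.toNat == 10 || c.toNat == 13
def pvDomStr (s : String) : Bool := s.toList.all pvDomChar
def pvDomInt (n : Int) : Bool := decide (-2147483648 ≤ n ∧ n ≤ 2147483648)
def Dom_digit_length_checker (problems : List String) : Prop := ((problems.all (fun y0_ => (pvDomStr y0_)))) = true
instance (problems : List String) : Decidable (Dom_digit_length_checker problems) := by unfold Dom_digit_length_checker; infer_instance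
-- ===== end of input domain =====

-- B is an ALTERNATIVE single-pass decomposition of A (same cost, one traversal); return-value equivalence only.

-- ===== PORT A =====
-- helper of A: returns False at the first token that is neither a digit string nor "+"/"-"
def digit_checker (problems : List String) : Bool :=
  problems.all (fun problem =>
    (PySem.Str.split₀ problem).all (fun op =>
      if PySem.Str.strIsdigit op then true
      else if op == "+" || op == "-" then true
      else false))

def digit_length_checker (problems : List String) : Bool :=
  if digit_checker problems then
    problems.all (fun problem =>
      (PySem.Str.split₀ problem).all (fun op =>
        if op == "+" || op == "-" then true
        else if PySem.Str.len op < 5 then true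
        else false))
  else true

-- ===== PORT B =====
-- inner token loop of B: none = early `return True`; some hl = has_long so far
def dlcAltTokens : List String → Bool → Option Bool
  | [], hl => some hl
  | op :: rest, hl =>
    if op == "+" || op == "-" then dlcAltTokens rest hl
    else if !(PySem.Str.strIsdigit op) then none
    else if 5 ≤ PySem.Str.len op then dlcAltTokens rest true
    else dlcAltTokens rest hl

-- outer problem loop of B
def dlcAltProblems : List String → Bool → Option Bool
  | [], hl => some hl
  | p :: rest, hl =>
    match dlcAltTokens (PySem.Str.split₀ p) hl with
    | none => none
    | some hl' => dlcAltProblems rest hl'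

def digit_length_checker_alt (problems : List String) : Bool :=
  match dlcAltProblems problems false with
  | none => true
  | some hl => !hl

-- ===== PRECONDITION & SPEC =====
def Spec_digit_length_checker (problems : List String) (out : Bool) : Prop := out = digit_length_checker_alt problems
instance (problems : List String) (out : Bool) : Decidable (Spec_digit_length_checker problems out) := by unfold Spec_digit_length_checker; infer_instance

-- ===== CLAIM (what is proved, stated in full; the proofs are below) =====
def Claim_equal_digit_length_checker : Prop := ∀ (problems : List String), Dom_digit_length_checker problems → Spec_digit_length_checker problems (digit_length_checker problems)

-- ===== LEMMAS AND PROOFS =====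

def dlcValid (op : String) : Bool :=
  if PySem.Str.strIsdigit op then true else if op == "+" || op == "-" then true else false

def dlcLong (op : String) : Bool :=
  !(op == "+" || op == "-") && decide (5 ≤ PySem.Str.len op)

theorem dlcAltTokens_spec (ts : List String) (hl : Bool) :
    dlcAltTokens ts hl = if ts.all dlcValid then some (hl || ts.any dlcLong) else none := by
  induction ts generalizing hl with
  | nil => simp [dlcAltTokens]
  | cons op rest ih =>
    by_cases hop : (op == "+" || op == "-") = true
    · have hv : dlcValid op = true := by
        unfold dlcValid; split <;> simp [hop]
      have hlng : dlcLong op = false := by simp [dlcLong, hop]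
      simp [dlcAltTokens, hop, ih, hv, hlng]
    · by_cases hd : PySem.Str.strIsdigit op = true
      · have hv : dlcValid op = true := by unfold dlcValid; rw [if_pos hd]
        simp only [PySem.Str.strIsdigit_eq] at hd
        by_cases h5 : (5 : Int) ≤ PySem.Str.len op
        · have hlng : dlcLong op = true := by
            rw [PySem.Str.len_eq] at h5
            simp [dlcLong, hop, String.length_toList]; have hLT := (String.length_toList (s := op)); omega
          rw [PySem.Str.len_eq] at h5
          simp [dlcAltTokens, hop, hd, ih, hv, hlng, String.length_toList]
          have hLT := (String.length_toList (s := op))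
          omega
        · have hlng : dlcLong op = false := by
            rw [PySem.Str.len_eq] at h5
            simp [dlcLong, String.length_toList]; have hLT := (String.length_toList (s := op)); omega
          rw [PySem.Str.len_eq] at h5
          simp [dlcAltTokens, hop, hd, ih, hv, hlng, String.length_toList]
          have hLT := (String.length_toList (s := op))
          omega
      · have hv : dlcValid op = false := by
          unfold dlcValid; rw [if_neg hd]; split <;> simp_all
        simp only [PySem.Str.strIsdigit_eq] at hd
        simp [dlcAltTokens, hop, hd, hv]

theorem dlcAltProblems_spec (ps : List String) (hl : Bool) :
    dlcAltProblems ps hl =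
      if ps.all (fun p => (PySem.Str.split₀ p).all dlcValid) then
        some (hl || ps.any (fun p => (PySem.Str.split₀ p).any dlcLong))
      else none := by
  induction ps generalizing hl with
  | nil => simp [dlcAltProblems]
  | cons p rest ih =>
    by_cases hv : (PySem.Str.split₀ p).all dlcValid = true
    · simp [dlcAltProblems, dlcAltTokens_spec, hv, ih, Bool.or_assoc]
    · simp [dlcAltProblems, dlcAltTokens_spec, hv]

theorem dlcShortOK_eq (op : String) :
    (if op == "+" || op == "-" then true else if PySem.Str.len op < 5 then true else false)
      = !dlcLong op := by
  unfold dlcLong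
  by_cases hop : (op == "+" || op == "-") = true
  · simp [hop]
  · rw [if_neg hop]
    have hLT := (String.length_toList (s := op))
    by_cases h5 : PySem.Str.len op < 5
    · rw [if_pos h5]
      rw [PySem.Str.len_eq] at h5
      simp [hop]
      omega
    · rw [if_neg h5]
      rw [PySem.Str.len_eq] at h5
      simp [hop]
      omega

-- ===== VERDICT (by name: the statement is the Claim_ definition above) =====
theorem digit_length_checker_spec : Claim_equal_digit_length_checker := by
  intro problems _
  unfold Spec_digit_length_checker digit_length_checker digit_length_checker_alt
  rw [dlcAltProblems_spec]
  have hdc : (problems.all fun p => (PySem.Str.split₀ p).all dlcValid) = digit_checker problems := rfl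
  by_cases hv : (problems.all fun p => (PySem.Str.split₀ p).all dlcValid) = true
  · rw [if_pos hv, if_pos (hdc ▸ hv)]
    simp only [Bool.false_or, List.not_any_eq_all_not]
    simp only [dlcShortOK_eq]
  · rw [if_neg (hdc ▸ hv), if_neg hv]
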